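-- pv_equiv track=rewrite | github.com/Talha-Essaadi/call-me-maybe | test/src/constrained_decoder.py | is_valid_number_prefix
-- ===== SOURCE A (Python) =====
-- def is_valid_number_prefix(s: str) -> bool:
--     """Check if string is a valid prefix of a JSON number.
--
--     Handles negative numbers, decimals, and scientific notation.
--
--     Args:
--         s: The string to check.
--
--     Returns:
--         True if s could be the start of a valid JSON number.
--     """
--     if not s:
--         return True
--     i = 0
--     n = len(s)
--     if s[i] == '-':
--         i += 1
--         if i >= n:
--             return True
--     if i >= n:
--         return True
--     if s[i] == '0':
--         i += 1
--         if i < n and s[i].isdigit():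
--             return False
--     elif s[i].isdigit():
--         while i < n and s[i].isdigit():
--             i += 1
--     else:
--         return False
--     if i >= n:
--         return True
--     if s[i] == '.':
--         i += 1
--         if i >= n:
--             return True
--         if not s[i].isdigit():
--             return False
--         while i < n and s[i].isdigit():
--             i += 1
--     if i >= n:
--         return True
--     if s[i] in ('e', 'E'):
--         i += 1
--         if i >= n:
--             return True
--         if s[i] in ('+', '-'):
--             i += 1
--         if i >= n:
--             return True
--         if not s[i].isdigit():
--             return False
--         while i < n and s[i].isdigit():
--             i += 1
--     return i == n
-- ===== SOURCE B (Python) =====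
-- # Table-driven DFA: one pass, one transition table, instead of A's staged index scan.
-- _T = {
--     ("start", "-"): "sign", ("start", "0"): "zero", ("start", "d"): "int",
--     ("sign", "0"): "zero", ("sign", "d"): "int",
--     ("zero", "."): "dot", ("zero", "e"): "exp",
--     ("int", "0"): "int", ("int", "d"): "int", ("int", "."): "dot", ("int", "e"): "exp",
--     ("dot", "0"): "frac", ("dot", "d"): "frac",
--     ("frac", "0"): "frac", ("frac", "d"): "frac", ("frac", "e"): "exp",
--     ("exp", "+"): "esign", ("exp", "-"): "esign", ("exp", "0"): "edig", ("exp", "d"): "edig",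
--     ("esign", "0"): "edig", ("esign", "d"): "edig",
--     ("edig", "0"): "edig", ("edig", "d"): "edig",
-- }
--
--
-- def _cls(c: str) -> str:
--     if c == "0":
--         return "0"
--     if c.isdigit():
--         return "d"
--     if c in ("e", "E"):
--         return "e"
--     if c in ("+", "-", "."):
--         return c
--     return "?"
--
--
-- def is_valid_number_prefix(s: str) -> bool:
--     state = "start"
--     for c in s:
--         state = _T.get((state, _cls(c)))
--         if state is None:
--             return False
--     return True
-- ===== Notes on version B (the rewrite author's own statement) =====
-- stated objective: alternative
-- what changed: A's staged index scan (sign, integer part with leading-zero check, fraction, exponent, each with its own while-loop and early returns) is replaced by a single-pass table-driven DFA: one character classifier, one transition dictionary, one loop.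
import Mathlib
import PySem

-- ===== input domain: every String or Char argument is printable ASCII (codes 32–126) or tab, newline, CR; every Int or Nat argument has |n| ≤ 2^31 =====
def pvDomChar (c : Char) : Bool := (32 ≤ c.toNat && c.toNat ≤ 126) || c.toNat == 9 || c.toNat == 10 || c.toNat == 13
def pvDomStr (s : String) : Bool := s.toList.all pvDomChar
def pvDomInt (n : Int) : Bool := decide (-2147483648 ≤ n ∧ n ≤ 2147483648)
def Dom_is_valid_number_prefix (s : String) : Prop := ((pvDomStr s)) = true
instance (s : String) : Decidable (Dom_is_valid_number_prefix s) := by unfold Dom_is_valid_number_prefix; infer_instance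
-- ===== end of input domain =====

-- B replaces A's staged index scan (sign part / integer part / fraction / exponent, with
-- inner while-loops) by a single-pass table-driven DFA; objective: alternative structure.

-- ===== PORT A =====
-- A's 'while i < n and s[i].isdigit(): i += 1' as list consumption
def skipDigits : List Char → List Char
  | [] => []
  | c :: rest => if PySem.Chars.isdigit c then skipDigits rest else c :: rest

-- A from 'if s[i] in ('e','E')' with i just past the 'e'/'E'
def expTail : List Char → Bool
  | [] => true                                   -- if i >= n: return True
  | d :: rest2 =>
    if d = '+' ∨ d = '-' then
      match rest2 with
      | [] => true                               -- if i >= n: return True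
      | x :: r3 =>
        if ¬ PySem.Chars.isdigit x then false
        else (skipDigits (x :: r3)).isEmpty      -- return i == n
    else if ¬ PySem.Chars.isdigit d then false
    else (skipDigits (d :: rest2)).isEmpty       -- return i == n

-- A from 'if i >= n: return True / if s[i] in ('e','E')'
def expPart : List Char → Bool
  | [] => true
  | c :: rest => if c = 'e' ∨ c = 'E' then expTail rest else false  -- return i == n (here i < n)

-- A from 'if i >= n: return True / if s[i] == '.''
def afterIntPart : List Char → Bool
  | [] => true
  | c :: rest =>
    if c = '.' then
      match rest with
      | [] => true                               -- if i >= n: return True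
      | d :: rest2 =>
        if ¬ PySem.Chars.isdigit d then false
        else expPart (skipDigits (d :: rest2))
    else expPart (c :: rest)

-- A from 'if s[i] == '0''  (the character after the optional '-')
def intStart : List Char → Bool
  | [] => true                                   -- if i >= n: return True
  | c :: rest =>
    if c = '0' then
      match rest with
      | d :: _ => if PySem.Chars.isdigit d then false else afterIntPart rest
      | [] => afterIntPart rest
    else if PySem.Chars.isdigit c then afterIntPart (skipDigits (c :: rest))
    else false

def is_valid_number_prefix (s : String) : Bool :=
  match s.toList with
  | [] => true                                   -- if not s: return True
  | c0 :: rest0 => if c0 = '-' then intStart rest0 else intStart (c0 :: rest0)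

-- ===== PORT B =====
inductive NState | start | sign | zero | int | dot | frac | exp | esign | edig
deriving DecidableEq, Repr

inductive NCls | c0 | cd | ce | cplus | cminus | cdot | cother
deriving DecidableEq, Repr

-- Source B's _cls
def nCls (c : Char) : NCls :=
  if c = '0' then .c0
  else if PySem.Chars.isdigit c then .cd
  else if c = 'e' ∨ c = 'E' then .ce
  else if c = '+' then .cplus
  else if c = '-' then .cminus
  else if c = '.' then .cdot
  else .cother

-- Source B's transition table _T (missing key → None)
def nStep (st : NState) (c : Char) : Option NState :=
  match st, nCls c with
  | .start, .cminus => some .sign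
  | .start, .c0 => some .zero
  | .start, .cd => some .int
  | .sign, .c0 => some .zero
  | .sign, .cd => some .int
  | .zero, .cdot => some .dot
  | .zero, .ce => some .exp
  | .int, .c0 => some .int
  | .int, .cd => some .int
  | .int, .cdot => some .dot
  | .int, .ce => some .exp
  | .dot, .c0 => some .frac
  | .dot, .cd => some .frac
  | .frac, .c0 => some .frac
  | .frac, .cd => some .frac
  | .frac, .ce => some .exp
  | .exp, .cplus => some .esign
  | .exp, .cminus => some .esign
  | .exp, .c0 => some .edig
  | .exp, .cd => some .edig
  | .esign, .c0 => some .edig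
  | .esign, .cd => some .edig
  | .edig, .c0 => some .edig
  | .edig, .cd => some .edig
  | _, _ => none

-- Source B's loop ('state is None → return False' = none propagation)
def nRun : NState → List Char → Option NState
  | st, [] => some st
  | st, c :: r =>
    match nStep st c with
    | none => none
    | some st' => nRun st' r

def is_valid_number_prefix_alt (s : String) : Bool :=
  (nRun .start s.toList).isSome

-- ===== PRECONDITION & SPEC =====
def Spec_is_valid_number_prefix (s : String) (out : Bool) : Prop := out = is_valid_number_prefix_alt s
instance (s : String) (out : Bool) : Decidable (Spec_is_valid_number_prefix s out) := by unfold Spec_is_valid_number_prefix; infer_instance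

-- ===== CLAIM (what is proved, stated in full; the proofs are below) =====
def Claim_equal_is_valid_number_prefix : Prop := ∀ (s : String), Dom_is_valid_number_prefix s → Spec_is_valid_number_prefix s (is_valid_number_prefix s)

-- ===== LEMMAS AND PROOFS =====

lemma isdigit_of_cls_c0 {c : Char} (h : nCls c = .c0) : PySem.Chars.isdigit c = true := by
  unfold nCls at h; split_ifs at h with h0 hd <;> first | (subst h0; decide) | exact hd | simp at h

lemma isdigit_of_cls_cd {c : Char} (h : nCls c = .cd) : PySem.Chars.isdigit c = true := by
  unfold nCls at h; split_ifs at h with h0 hd <;> first | exact hd | simp at h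

lemma cls_of_digit {c : Char} (h : PySem.Chars.isdigit c = true) :
    nCls c = .c0 ∨ nCls c = .cd := by
  unfold nCls; split_ifs <;> simp_all

lemma digit_ne_dot {c : Char} (h : PySem.Chars.isdigit c = true) : c ≠ '.' := by
  rintro rfl; revert h; decide

lemma digit_ne_e {c : Char} (h : PySem.Chars.isdigit c = true) : ¬ (c = 'e' ∨ c = 'E') := by
  rintro (rfl | rfl) <;> revert h <;> decide

-- a digit head is rejected by afterIntPart (matches the 'zero' state rejecting digits)
lemma afterIntPart_digit {d : Char} (h : PySem.Chars.isdigit d = true) (r : List Char) :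
    afterIntPart (d :: r) = false := by
  simp [afterIntPart, expPart, digit_ne_dot h, digit_ne_e h]

lemma L_edig : ∀ l, (skipDigits l).isEmpty = (nRun .edig l).isSome := by
  intro l
  induction l with
  | nil => rfl
  | cons c r ih =>
    by_cases hd : PySem.Chars.isdigit c = true
    · rcases cls_of_digit hd with h | h <;> simp [skipDigits, hd, nRun, nStep, h, ih]
    · have h0 : c ≠ '0' := by rintro rfl; exact hd (by decide)
      have : nCls c ≠ .c0 ∧ nCls c ≠ .cd := by
        constructor <;> intro h
        · exact hd (isdigit_of_cls_c0 h)
        · exact hd (isdigit_of_cls_cd h)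
      rcases h : nCls c <;> simp_all [skipDigits, nRun, nStep, h]

lemma L_exp : ∀ l, expTail l = (nRun .exp l).isSome := by
  intro l
  cases l with
  | nil => rfl
  | cons d rest2 =>
    by_cases hpm : d = '+' ∨ d = '-'
    · have hcls : nCls d = .cplus ∨ nCls d = .cminus := by
        rcases hpm with rfl | rfl
        · left; decide
        · right; decide
      cases rest2 with
      | nil => rcases hcls with h | h <;> simp [expTail, hpm, nRun, nStep, h]
      | cons x r3 =>
        by_cases hx : PySem.Chars.isdigit x = true
        · have := L_edig r3
          rcases hcls with h | h <;> rcases cls_of_digit hx with hc | hc <;>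
            simp_all [expTail, hpm, nRun, nStep, skipDigits]
        · have hxc : nCls x ≠ .c0 ∧ nCls x ≠ .cd := by
            constructor <;> intro h
            · exact hx (isdigit_of_cls_c0 h)
            · exact hx (isdigit_of_cls_cd h)
          rcases hcx : nCls x <;> rcases hcls with h | h <;>
            simp_all [expTail, hpm, nRun, nStep]
    · by_cases hd : PySem.Chars.isdigit d = true
      · have := L_edig rest2
        rcases cls_of_digit hd with hc | hc <;>
          simp_all [expTail, hpm, nRun, nStep, skipDigits]
      · have hdc : nCls d ≠ .c0 ∧ nCls d ≠ .cd ∧ nCls d ≠ .cplus ∧ nCls d ≠ .cminus := by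
          refine ⟨?_, ?_, ?_, ?_⟩ <;> intro h
          · exact hd (isdigit_of_cls_c0 h)
          · exact hd (isdigit_of_cls_cd h)
          · unfold nCls at h; split_ifs at h <;> simp_all
          · unfold nCls at h; split_ifs at h <;> simp_all
        rcases hcx : nCls d <;> simp_all [expTail, hpm, nRun, nStep]

lemma L_frac : ∀ l, expPart (skipDigits l) = (nRun .frac l).isSome := by
  intro l
  induction l with
  | nil => rfl
  | cons c r ih =>
    by_cases hd : PySem.Chars.isdigit c = true
    · rcases cls_of_digit hd with h | h <;> simp [skipDigits, hd, nRun, nStep, h, ih]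
    · by_cases he : c = 'e' ∨ c = 'E'
      · have hcls : nCls c = .ce := by
          rcases he with rfl | rfl <;> decide
        simp [skipDigits, hd, expPart, he, nRun, nStep, hcls, L_exp]
      · have hcc : nCls c ≠ .c0 ∧ nCls c ≠ .cd ∧ nCls c ≠ .ce := by
          refine ⟨?_, ?_, ?_⟩ <;> intro h
          · exact hd (by simpa using isdigit_of_cls_c0 h)
          · exact hd (by simpa using isdigit_of_cls_cd h)
          · unfold nCls at h; split_ifs at h <;> simp_all
        rcases hcx : nCls c <;> simp_all [skipDigits, expPart, nRun, nStep]

lemma L_zero : ∀ l, afterIntPart l = (nRun .zero l).isSome := by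
  intro l
  cases l with
  | nil => rfl
  | cons c rest =>
    by_cases hdot : c = '.'
    · subst hdot
      have hcls : nCls '.' = .cdot := by decide
      cases rest with
      | nil => simp [afterIntPart, nRun, nStep, hcls]
      | cons d r2 =>
        by_cases hd : PySem.Chars.isdigit d = true
        · have := L_frac (d :: r2)
          have hsd : skipDigits (d :: r2) = skipDigits r2 := by simp [skipDigits, hd]
          rcases cls_of_digit hd with hc | hc <;>
            simp_all [afterIntPart, nRun, nStep, skipDigits]
        · have hdc : nCls d ≠ .c0 ∧ nCls d ≠ .cd := by
            constructor <;> intro h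
            · exact hd (isdigit_of_cls_c0 h)
            · exact hd (isdigit_of_cls_cd h)
          rcases hcx : nCls d <;> simp_all [afterIntPart, nRun, nStep]
    · by_cases he : c = 'e' ∨ c = 'E'
      · have hcls : nCls c = .ce := by rcases he with rfl | rfl <;> decide
        simp [afterIntPart, hdot, expPart, he, nRun, nStep, hcls, L_exp]
      · have hcc : nCls c ≠ .cdot ∧ nCls c ≠ .ce := by
          constructor <;> intro h
          · unfold nCls at h; split_ifs at h <;> simp_all
          · unfold nCls at h; split_ifs at h <;> simp_all
        rcases hcx : nCls c <;>
          simp_all [afterIntPart, expPart, nRun, nStep]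

lemma L_int : ∀ l, afterIntPart (skipDigits l) = (nRun .int l).isSome := by
  intro l
  induction l with
  | nil => rfl
  | cons c r ih =>
    by_cases hd : PySem.Chars.isdigit c = true
    · rcases cls_of_digit hd with h | h <;> simp [skipDigits, hd, nRun, nStep, h, ih]
    · have hsd : skipDigits (c :: r) = c :: r := by simp [skipDigits, hd]
      have hz := L_zero (c :: r)
      -- int and zero agree on non-digit heads
      have hstep : nStep .int c = nStep .zero c := by
        have h0 : nCls c ≠ .c0 := fun h => by simp [isdigit_of_cls_c0 h] at hd
        have h1 : nCls c ≠ .cd := fun h => by simp [isdigit_of_cls_cd h] at hd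
        rcases hcx : nCls c <;> simp_all [nStep]
      rw [hsd, hz]
      cases r with
      | nil => simp [nRun, hstep]
      | cons y ys => simp [nRun, hstep]

lemma L_sign : ∀ l, intStart l = (nRun .sign l).isSome := by
  intro l
  cases l with
  | nil => rfl
  | cons c rest =>
    by_cases h0 : c = '0'
    · subst h0
      have hcls : nCls '0' = .c0 := by decide
      have hz := L_zero rest
      have hbody : intStart ('0' :: rest) = afterIntPart rest := by
        cases rest with
        | nil => rfl
        | cons d r2 =>
          by_cases hd : PySem.Chars.isdigit d = true
          · simp [intStart, hd, afterIntPart_digit hd]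
          · simp [intStart, hd]
      simp [hbody, hz, nRun, nStep, hcls]
    · by_cases hd : PySem.Chars.isdigit c = true
      · have hcls : nCls c = .cd := by
          rcases cls_of_digit hd with h | h
          · exact absurd (by unfold nCls at h; split_ifs at h <;> simp_all) h0
          · exact h
        have hi := L_int (c :: rest)
        have : nRun .int (c :: rest) = nRun .int rest := by
          rcases cls_of_digit hd with h | h <;> simp [nRun, nStep, h]
        simp_all [intStart, h0, nRun, nStep]
      · have hcc : nCls c ≠ .c0 ∧ nCls c ≠ .cd := by
          constructor <;> intro h
          · exact hd (isdigit_of_cls_c0 h)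
          · exact hd (isdigit_of_cls_cd h)
        rcases hcx : nCls c <;> simp_all [intStart, nRun, nStep]

-- ===== VERDICT (by name: the statement is the Claim_ definition above) =====
theorem is_valid_number_prefix_spec : Claim_equal_is_valid_number_prefix := by
  intro s _
  unfold Spec_is_valid_number_prefix is_valid_number_prefix is_valid_number_prefix_alt
  cases hl : s.toList with
  | nil => rfl
  | cons c0 rest0 =>
    by_cases hm : c0 = '-'
    · subst hm
      have hcls : nCls '-' = .cminus := by decide
      simp [L_sign rest0, nRun, nStep, hcls]
    · -- start and sign agree on non-'-' heads
      have hstep : nStep .start c0 = nStep .sign c0 := by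
        have : nCls c0 ≠ .cminus := by
          intro h; unfold nCls at h; split_ifs at h <;> simp_all
        rcases hcx : nCls c0 <;> simp_all [nStep]
      have hs := L_sign (c0 :: rest0)
      change (if c0 = '-' then intStart rest0 else intStart (c0 :: rest0)) = _
      rw [if_neg hm, hs]
      cases rest0 with
      | nil => simp [nRun, hstep]
      | cons y ys => simp [nRun, hstep]
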